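-- pv_equiv track=rewrite | github.com/alfiaah/MCA_Programs | python/reverseANum.py | reverse_and_add
-- ===== SOURCE A (Python) =====
-- def reverse_and_add(num):
--     """
--     Reverses the digits of a number and adds them to the original.
--     """
--     original_num = num
--     reversed_num = 0
--
--     while num > 0:
--         digit = num % 10
--         reversed_num = reversed_num * 10 + digit
--         num //= 10
--
--     return original_num + reversed_num
-- ===== SOURCE B (Python) =====
-- def reverse_and_add(num):
--     """
--     Reverses the digits of a number and adds them to the original.
--     A negative number has no digit reversal; it is returned unchanged.
--     """
--     if num < 0:
--         return num
--     reversed_num = 0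
--     for digit in str(num)[::-1]:
--         reversed_num = 10 * reversed_num + int(digit)
--     return num + reversed_num
-- ===== Notes on version B (the rewrite author's own statement) =====
-- stated objective: alternative
-- what changed: B replaces A's destructive while-loop of %/// digit extraction with a pass over the decimal string representation: it reverses str(num) and accumulates int(digit) per character; negatives are returned unchanged as in A.
import Mathlib
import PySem

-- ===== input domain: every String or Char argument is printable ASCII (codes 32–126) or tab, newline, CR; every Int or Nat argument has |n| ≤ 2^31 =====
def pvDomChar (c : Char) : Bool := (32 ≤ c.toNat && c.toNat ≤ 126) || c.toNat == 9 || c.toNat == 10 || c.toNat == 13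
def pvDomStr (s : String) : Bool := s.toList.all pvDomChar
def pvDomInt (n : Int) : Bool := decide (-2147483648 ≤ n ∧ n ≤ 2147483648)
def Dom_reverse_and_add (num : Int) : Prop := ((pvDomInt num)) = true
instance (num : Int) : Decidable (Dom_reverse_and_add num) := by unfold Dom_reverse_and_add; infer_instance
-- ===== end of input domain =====

-- B reads the digits off the reversed decimal string str(num)[::-1] instead of A's
-- destructive %-and-// while-loop; same value everywhere (objective: alternative).

-- ===== PORT A =====
-- the `while num > 0` loop of A, acting on the state (num, reversed_num)
def revLoopA (num reversed_num : Int) : Int :=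
  if num > 0 then
    revLoopA (PySem.Int.floordiv num 10) (reversed_num * 10 + PySem.Int.mod num 10)
  else reversed_num
termination_by num.toNat
decreasing_by
  rename_i h
  rw [PySem.Int.floordiv_eq_ediv_of_pos (by omega : (0:Int) < 10)]
  have h2 : num / 10 < num := Int.ediv_lt_of_lt_mul (by omega) (by nlinarith)
  omega

def reverse_and_add (num : Int) : Int :=
  -- original_num = num; the loop; return original_num + reversed_num
  num + revLoopA num 0

-- ===== PORT B =====
def reverse_and_add_alt (num : Int) : Int :=
  if num < 0 then num
  else
    -- for digit in str(num)[::-1]: reversed_num = 10 * reversed_num + int(digit)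
    -- str(num)[::-1] is (toChars num).reverse (PySem.Str.slice?_none_none_neg_one);
    -- int(digit) never raises here (every char of str of a nonnegative int is a digit),
    -- so the Option is discharged with getD (a totalizing guard, not a value change)
    num + (PySem.Int.toChars num).reverse.foldl
      (fun reversed_num c => 10 * reversed_num + (PySem.Int.ofChars? [c]).getD 0) 0

-- ===== PRECONDITION & SPEC =====
def Spec_reverse_and_add (num : Int) (out : Int) : Prop := out = reverse_and_add_alt num
instance (num : Int) (out : Int) : Decidable (Spec_reverse_and_add num out) := by unfold Spec_reverse_and_add; infer_instance

-- ===== CLAIM =====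
def Claim_equal_reverse_and_add : Prop := ∀ (num : Int), Dom_reverse_and_add num → Spec_reverse_and_add num (reverse_and_add num)

-- ===== LEMMAS AND PROOFS =====

-- `Nat.toDigits 10` on a positive n is the digitChar image of the (LSB-first) digits, reversed.
theorem toDigitsCore_eq_digits (fuel n : Nat) (ds : List Char) (hn : 0 < n) (hf : n < fuel) :
    Nat.toDigitsCore 10 fuel n ds = ((Nat.digits 10 n).map Nat.digitChar).reverse ++ ds := by
  induction fuel generalizing n ds with
  | zero => omega
  | succ f ih =>
    rw [Nat.toDigitsCore]
    have hdig : Nat.digits 10 n = n % 10 :: Nat.digits 10 (n / 10) :=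
      Nat.digits_def' (by omega) hn
    by_cases h0 : n / 10 = 0
    · simp only [h0]
      rw [hdig, h0]
      simp
    · simp only [if_neg h0]
      rw [ih (n / 10) _ (Nat.pos_of_ne_zero h0) (by
        have := Nat.div_lt_self hn (by omega : 1 < 10); omega)]
      rw [hdig]
      simp

theorem toChars_pos (num : Int) (h : 0 < num) :
    PySem.Int.toChars num = (Nat.digits 10 num.toNat).reverse.map Nat.digitChar := by
  have : ¬ num < 0 := by omega
  simp only [PySem.Int.toChars, if_neg this, Nat.toDigits]
  rw [toDigitsCore_eq_digits (num.toNat + 1) num.toNat [] (by omega) (by omega)]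
  simp [List.map_reverse]

-- A's loop computes ofDigits of the reversed digit list (with the accumulator shifted in front).
theorem revLoopA_eq (m : Nat) (acc : Int) :
    revLoopA (m : Int) acc
      = acc * 10 ^ (Nat.digits 10 m).length
        + ((Nat.ofDigits 10 ((Nat.digits 10 m).reverse) : ℕ) : ℤ) := by
  induction m using Nat.strong_induction_on generalizing acc with
  | _ m ih =>
    rw [revLoopA]
    by_cases hm : 0 < m
    · have hgt : ((m : Int) > 0) := by exact_mod_cast hm
      rw [if_pos hgt]
      have hfd : PySem.Int.floordiv (m : Int) 10 = ((m / 10 : Nat) : Int) := by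
        exact_mod_cast PySem.Int.floordiv_natCast m 10
      have hmd : PySem.Int.mod (m : Int) 10 = ((m % 10 : Nat) : Int) := by
        exact_mod_cast PySem.Int.mod_natCast m 10
      rw [hfd, hmd, ih (m / 10) (Nat.div_lt_self hm (by omega))]
      have hdig : Nat.digits 10 m = m % 10 :: Nat.digits 10 (m / 10) :=
        Nat.digits_def' (by omega) hm
      rw [hdig]
      simp only [List.reverse_cons, List.length_cons]
      rw [Nat.ofDigits_append]
      simp only [Nat.ofDigits_singleton, List.length_reverse]
      push_cast
      ring
    · have : ¬ ((m : Int) > 0) := by omega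
      rw [if_neg this]
      have : m = 0 := by omega
      subst this
      simp

-- int() of a single decimal digit character
theorem ofChars?_digitChar (d : Nat) (h : d < 10) :
    (PySem.Int.ofChars? [Nat.digitChar d]).getD 0 = (d : Int) := by
  interval_cases d <;> decide

-- B's character fold over digitChar images is the same Horner value.
theorem foldB_eq (ds : List Nat) (acc : Int) (hd : ∀ d ∈ ds, d < 10) :
    (ds.map Nat.digitChar).foldl
      (fun reversed_num c => 10 * reversed_num + (PySem.Int.ofChars? [c]).getD 0) acc
      = acc * 10 ^ ds.length + ((Nat.ofDigits 10 ds.reverse : ℕ) : ℤ) := by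
  induction ds generalizing acc with
  | nil => simp
  | cons d ds ih =>
    simp only [List.map_cons, List.foldl_cons]
    rw [ofChars?_digitChar d (hd d (List.mem_cons_self))]
    rw [ih _ (fun x hx => hd x (List.mem_cons_of_mem _ hx))]
    simp only [List.reverse_cons, List.length_cons]
    rw [Nat.ofDigits_append]
    simp only [Nat.ofDigits_singleton, List.length_reverse]
    push_cast
    ring

theorem reverse_and_add_eq (num : Int) :
    reverse_and_add num = reverse_and_add_alt num := by
  unfold reverse_and_add reverse_and_add_alt
  by_cases hneg : num < 0
  · rw [if_pos hneg, revLoopA, if_neg (by omega)]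
    ring
  · rw [if_neg hneg]
    by_cases h0 : num = 0
    · subst h0
      rw [revLoopA, if_neg (by omega)]
      norm_num
      decide
    · have hpos : 0 < num := by omega
      have hm : num = ((num.toNat : Nat) : Int) := by omega
      rw [toChars_pos num hpos]
      rw [List.map_reverse, List.reverse_reverse]
      have hall : ∀ d ∈ Nat.digits 10 num.toNat, d < 10 := by
        intro d hdmem
        exact Nat.digits_lt_base (by omega) hdmem
      rw [foldB_eq (Nat.digits 10 num.toNat) 0 hall]
      conv_lhs => rw [hm]
      rw [revLoopA_eq num.toNat 0]
      simp
      omega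

-- ===== VERDICT (by name: the statement is the Claim_ definition above) =====
theorem reverse_and_add_spec : Claim_equal_reverse_and_add := by
  intro num _
  unfold Spec_reverse_and_add
  exact reverse_and_add_eq num
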